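-- pv_equiv track=rewrite | github.com/georgebvro/freeCodeCamp-Daily-Coding-Challenge | 2025-08/2025-08-28/second_best.py | get_laptop_cost
-- ===== SOURCE A (Python) =====
-- def get_laptop_cost(laptops, budget):
--     prices = laptops[:]
--     prices.sort(reverse = True)
--     prices = list(dict.fromkeys(prices))
--
--     if len(prices) >= 2 and prices[1] <= budget:
--         return prices[1]
--
--     else:
--         for i in range(2, len(prices) - 1):
--             if prices[i] <= budget:
--                 return prices[i]
--
--     return 0
-- ===== SOURCE B (Python) =====
-- def get_laptop_cost(laptops, budget):
--     if not laptops: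
--         return 0
--     mx = laptops[0]
--     for p in laptops[1:]:
--         if p > mx:
--             mx = p
--     hit = False
--     best = 0
--     for p in laptops:
--         if p < mx and p <= budget and (not hit or p > best):
--             best = p
--             hit = True
--     return best if hit else 0
-- ===== Notes on version B (the rewrite author's own statement) =====
-- stated objective: faster
-- what changed: Replaces A's sort-then-dedup-then-indexed-scan with a sort-free two-pass linear algorithm: one pass finds the maximum price, a second pass keeps the best price that is strictly below the maximum and within budget (O(n) vs O(n log n), measured ~5x at n=262144); this also fixes A's off-by-one loop bound that skips the cheapest price.
-- intended difference: On inputs with at least 3 distinct prices where only the minimum (nonzero) price fits the budget, A returns 0 because its loop range(2, len-1) never examines the cheapest distinct price, while B returns that minimum price, the intended highest affordable non-maximum price. — e.g. on get_laptop_cost([5, 3, 1], 2): A returns 0, B returns 1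
import Mathlib
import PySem

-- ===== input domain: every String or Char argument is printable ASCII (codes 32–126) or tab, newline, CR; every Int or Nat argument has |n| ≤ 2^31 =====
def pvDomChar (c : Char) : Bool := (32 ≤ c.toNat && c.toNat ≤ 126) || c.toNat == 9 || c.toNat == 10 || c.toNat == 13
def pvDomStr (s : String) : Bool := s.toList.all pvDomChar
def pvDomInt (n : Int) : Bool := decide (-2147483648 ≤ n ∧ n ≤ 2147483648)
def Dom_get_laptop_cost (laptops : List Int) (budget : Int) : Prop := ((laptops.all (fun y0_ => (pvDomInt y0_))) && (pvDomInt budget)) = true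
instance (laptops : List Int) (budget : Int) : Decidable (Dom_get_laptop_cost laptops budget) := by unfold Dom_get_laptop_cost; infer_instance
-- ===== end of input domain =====

-- B replaces A's sort-then-dedup-then-indexed-scan with a sort-free two-pass linear algorithm (find the maximum,
-- then keep the best price strictly below it within budget), and intentionally differs where A's loop bound
-- range(2, len-1) skips the cheapest distinct price (see D_ below).


-- ===== PORT A =====
-- A's for-loop 'for i in range(2, len(prices) - 1): if prices[i] <= budget: return prices[i]'
def pvScanA (prices : List Int) (budget : Int) : List Int → Int
  | [] => 0
  | i :: rest =>
    if PySem.List.pyGetD prices i 0 ≤ budget then PySem.List.pyGetD prices i 0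
    else pvScanA prices budget rest

def get_laptop_cost (laptops : List Int) (budget : Int) : Int :=
  let prices0 := PySem.List.sorted laptops (fun x => x) true
  let prices := PySem.List.dedup prices0
  if 2 ≤ prices.length ∧ PySem.List.pyGetD prices 1 0 ≤ budget then
    PySem.List.pyGetD prices 1 0
  else
    pvScanA prices budget (PySem.List.pyRange 2 ((prices.length : Int) - 1))

-- ===== PORT B =====
-- Source B's second loop: state (hit, best); take p when p < mx, p ≤ budget, and (not hit or p > best)
def pvStep (mx budget : Int) (s : Bool × Int) (p : Int) : Bool × Int :=
  if p < mx ∧ p ≤ budget ∧ (s.1 = false ∨ s.2 < p) then (true, p) else s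

def get_laptop_cost_alt (laptops : List Int) (budget : Int) : Int :=
  match laptops with
  | [] => 0
  | p0 :: rest =>
    -- first pass: mx = running maximum over laptops
    let mx := rest.foldl (fun m p => if p > m then p else m) p0
    -- second pass: best affordable price strictly below mx
    let s := (p0 :: rest).foldl (pvStep mx budget) (false, 0)
    if s.1 then s.2 else 0

-- ===== PRECONDITION & SPEC =====
-- On inputs with at least 3 distinct prices where only the minimum (nonzero) price fits the budget, A returns 0
-- because its loop range(2, len-1) never examines the cheapest distinct price, while B returns that minimum price,
-- the intended highest affordable non-maximum price.
def D_get_laptop_cost (laptops : List Int) (budget : Int) : Prop :=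
  3 ≤ (PySem.List.dedup laptops).length ∧
  (∃ m ∈ laptops, m ≤ budget ∧ m ≠ 0) ∧
  ∀ x ∈ laptops, x ≤ budget → ∀ y ∈ laptops, x ≤ y
instance (laptops : List Int) (budget : Int) : Decidable (D_get_laptop_cost laptops budget) := by
  unfold D_get_laptop_cost; infer_instance

def Spec_get_laptop_cost (laptops : List Int) (budget : Int) (out : Int) : Prop :=
  ¬ D_get_laptop_cost laptops budget → out = get_laptop_cost_alt laptops budget
instance (laptops : List Int) (budget : Int) (out : Int) : Decidable (Spec_get_laptop_cost laptops budget out) := by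
  unfold Spec_get_laptop_cost; infer_instance

def pvDiffWitness_get_laptop_cost : List Int × Int := ([5, 3, 1], 2)
def pvDiffWitnessOut_get_laptop_cost : Int × Int := (0, 1)

-- ===== CLAIM (what is proved, stated in full; the proofs are below) =====
def Claim_unchanged_get_laptop_cost : Prop := ∀ (laptops : List Int) (budget : Int), Dom_get_laptop_cost laptops budget → Spec_get_laptop_cost laptops budget (get_laptop_cost laptops budget)
def Claim_changed_get_laptop_cost : Prop := Dom_get_laptop_cost (pvDiffWitness_get_laptop_cost.1) (pvDiffWitness_get_laptop_cost.2) ∧ D_get_laptop_cost (pvDiffWitness_get_laptop_cost.1) (pvDiffWitness_get_laptop_cost.2) ∧ get_laptop_cost (pvDiffWitness_get_laptop_cost.1) (pvDiffWitness_get_laptop_cost.2) = pvDiffWitnessOut_get_laptop_cost.1 ∧ get_laptop_cost_alt (pvDiffWitness_get_laptop_cost.1) (pvDiffWitness_get_laptop_cost.2) = pvDiffWitnessOut_get_laptop_cost.2 ∧ pvDiffWitnessOut_get_laptop_cost.1 ≠ pvDiffWitnessOut_get_laptop_cost.2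
def Claim_exact_get_laptop_cost : Prop := ∀ (laptops : List Int) (budget : Int), Dom_get_laptop_cost laptops budget → D_get_laptop_cost laptops budget → get_laptop_cost laptops budget ≠ get_laptop_cost_alt laptops budget

-- ===== LEMMAS AND PROOFS =====

-- min/max of a list (0 on the empty list; used only in the proofs)
def pvListMin (xs : List Int) : Int := match xs with | [] => 0 | x :: t => t.foldl min x
def pvListMax (xs : List Int) : Int := match xs with | [] => 0 | x :: t => t.foldl max x

-- the deduplicated descending price list A works on (and the yardstick both ports are compared against)
def pvD (laptops : List Int) : List Int :=
  PySem.List.dedup (PySem.List.sorted laptops (fun x => x) true)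

-- 'first element ≤ budget, else 0' on a list
def pvFirstLe (budget : Int) : List Int → Int
  | [] => 0
  | x :: t => if x ≤ budget then x else pvFirstLe budget t

lemma pv_ofList_sublist {α : Type} [BEq α] [LawfulBEq α] (xs : List α) :
    (PySem.Set.ofList xs).Sublist xs := by
  induction xs with
  | nil => simp [PySem.Set.ofList_nil]
  | cons x xs ih =>
    rw [PySem.Set.ofList_cons]
    have hf : ((PySem.Set.ofList xs).discard x).Sublist (PySem.Set.ofList xs) := by
      simp only [PySem.Set.discard]
      exact List.filter_sublist (l := PySem.Set.ofList xs) (p := fun y => !y == x)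
    exact List.Sublist.cons₂ x (hf.trans ih)

lemma pv_d_pairwise (laptops : List Int) :
    (pvD laptops).Pairwise (fun a b => b < a) := by
  have hsub : (pvD laptops).Sublist (PySem.List.sorted laptops (fun x => x) true) := by
    rw [pvD, PySem.List.dedup_eq_ofList]
    exact pv_ofList_sublist _
  have hle := (PySem.List.sorted_pairwise_rev laptops (fun x => x)).sublist hsub
  have hnd : (pvD laptops).Nodup := PySem.List.nodup_dedup _
  exact (hle.and hnd).imp (fun h => lt_of_le_of_ne h.1 (Ne.symm h.2))

lemma pv_mem_d (laptops : List Int) (x : Int) : x ∈ pvD laptops ↔ x ∈ laptops := by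
  simp [pvD, PySem.List.mem_sorted]

lemma pv_foldl_max_le (t : List Int) : ∀ x, (∀ y ∈ t, y ≤ x) → t.foldl max x = x := by
  induction t with
  | nil => intro x _; rfl
  | cons y t ih =>
    intro x h
    simp only [List.foldl_cons]
    rw [max_eq_left (h y (by simp))]
    exact ih x (fun z hz => h z (by simp [hz]))

lemma pv_scan_eq (prices : List Int) (budget : Int) : ∀ (n a : Nat), prices.length ≤ n + a →
    pvScanA prices budget (PySem.List.pyRange (a : Int) ((prices.length : Int) - 1)) =
      pvFirstLe budget ((prices.drop a).take (prices.length - 1 - a)) := by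
  intro n
  induction n with
  | zero =>
    intro a ha
    rw [PySem.List.pyRange_one_eq_nil (by omega),
        List.drop_eq_nil_of_le (by omega)]
    simp [pvScanA, pvFirstLe]
  | succ n ih =>
    intro a ha
    by_cases hlt : (a : Int) < (prices.length : Int) - 1
    · have halen : a < prices.length := by omega
      rw [PySem.List.pyRange_one_cons hlt]
      simp only [pvScanA]
      rw [PySem.List.pyGetD_ofNat prices a 0 halen]
      rw [List.drop_eq_getElem_cons halen]
      have harith : prices.length - 1 - a = (prices.length - 1 - (a + 1)) + 1 := by omega
      rw [harith, List.take_succ_cons]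
      simp only [pvFirstLe]
      have h2 := ih (a + 1) (by omega)
      rw [show ((a + 1 : Nat) : Int) = (a : Int) + 1 by push_cast; ring] at h2
      rw [h2]
    · rw [PySem.List.pyRange_one_eq_nil (by omega)]
      have : prices.length - 1 - a = 0 := by omega
      rw [this]
      simp [pvScanA, pvFirstLe]

lemma pv_firstLe_maxD (budget : Int) :
    ∀ (l : List Int), l.Pairwise (fun a b => b ≤ a) →
      PySem.List.maxD (l.filter (fun p => decide (p ≤ budget))) (fun x => x) 0 = pvFirstLe budget l := by
  intro l
  induction l with
  | nil => intro _; rfl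
  | cons x t ih =>
    intro hp
    rcases List.pairwise_cons.mp hp with ⟨hx, ht⟩
    by_cases hb : x ≤ budget
    · simp only [List.filter_cons, hb, decide_true, pvFirstLe, if_true]
      rw [PySem.List.maxD, PySem.List.max?_id_cons, Option.getD_some]
      exact pv_foldl_max_le _ x (fun y hy => hx y (List.mem_of_mem_filter hy))
    · simp only [List.filter_cons, hb, decide_false, pvFirstLe, if_false]
      exact ih ht

lemma pv_firstLe_zero (budget : Int) : ∀ (l : List Int), (∀ y ∈ l, budget < y) → pvFirstLe budget l = 0 := by
  intro l
  induction l with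
  | nil => intro _; rfl
  | cons x t ih =>
    intro h
    simp only [pvFirstLe, if_neg (not_le.mpr (h x (by simp)))]
    exact ih (fun y hy => h y (by simp [hy]))

lemma pv_firstLe_append_none (budget : Int) (r : List Int) :
    ∀ (l : List Int), (∀ y ∈ l, budget < y) → pvFirstLe budget (l ++ r) = pvFirstLe budget r := by
  intro l
  induction l with
  | nil => intro _; rfl
  | cons x t ih =>
    intro h
    simp only [List.cons_append, pvFirstLe, if_neg (not_le.mpr (h x (by simp)))]
    exact ih (fun y hy => h y (by simp [hy]))

lemma pv_firstLe_append_hit (budget : Int) (r : List Int) :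
    ∀ (l : List Int), (∃ y ∈ l, y ≤ budget) → pvFirstLe budget (l ++ r) = pvFirstLe budget l := by
  intro l
  induction l with
  | nil => rintro ⟨y, hy, -⟩; cases hy
  | cons x t ih =>
    intro h
    by_cases hx : x ≤ budget
    · simp [pvFirstLe, hx]
    · simp only [List.cons_append, pvFirstLe, if_neg hx]
      refine ih ?_
      rcases h with ⟨y, hy, hyb⟩
      rcases List.mem_cons.mp hy with rfl | hyt
      · exact absurd hyb hx
      · exact ⟨y, hyt, hyb⟩

lemma pv_A_eq (laptops : List Int) (budget : Int) :
    get_laptop_cost laptops budget =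
      (if 2 ≤ (pvD laptops).length ∧ PySem.List.pyGetD (pvD laptops) 1 0 ≤ budget then
        PySem.List.pyGetD (pvD laptops) 1 0
      else pvFirstLe budget (((pvD laptops).drop 2).take ((pvD laptops).length - 1 - 2))) := by
  simp only [get_laptop_cost]
  rw [show PySem.List.dedup (PySem.List.sorted laptops (fun x => x) true) = pvD laptops from rfl]
  have h := pv_scan_eq (pvD laptops) budget (pvD laptops).length 2 (by omega)
  norm_num at h
  rw [h]

-- ===== lemmas characterising B's two passes =====

lemma pv_if_max (m p : Int) : (if p > m then p else m) = max m p := by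
  rw [max_def]; split_ifs <;> omega

lemma pv_listMax_spec (xs : List Int) (h : xs ≠ []) :
    pvListMax xs ∈ xs ∧ ∀ y ∈ xs, y ≤ pvListMax xs := by
  rcases xs with _ | ⟨x, t⟩
  · exact absurd rfl h
  · have hm := PySem.List.max?_id_cons x t
    simp only [pvListMax]
    exact ⟨PySem.List.max?_mem hm, fun y hy => PySem.List.max?_isMax hm y hy⟩

lemma pv_listMin_spec (xs : List Int) (h : xs ≠ []) :
    pvListMin xs ∈ xs ∧ ∀ y ∈ xs, pvListMin xs ≤ y := by
  rcases xs with _ | ⟨x, t⟩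
  · exact absurd rfl h
  · have hm := PySem.List.min?_id_cons x t
    simp only [pvListMin]
    exact ⟨PySem.List.min?_mem hm, fun y hy => PySem.List.min?_isMin hm y hy⟩

-- the maximum is determined by the member set
lemma pv_listMax_eq_of_members (l1 l2 : List Int) (h1 : l1 ≠ []) (h2 : l2 ≠ [])
    (hm : ∀ x, x ∈ l1 ↔ x ∈ l2) : pvListMax l1 = pvListMax l2 := by
  obtain ⟨ha1, ha2⟩ := pv_listMax_spec l1 h1
  obtain ⟨hb1, hb2⟩ := pv_listMax_spec l2 h2
  exact le_antisymm (hb2 _ ((hm _).mp ha1)) (ha2 _ ((hm _).mpr hb1))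

-- B's first pass computes pvListMax
lemma pv_mxfold (p0 : Int) (rest : List Int) :
    rest.foldl (fun m p => if p > m then p else m) p0 = pvListMax (p0 :: rest) := by
  have hfun : (fun m p : Int => if p > m then p else m) = (fun m p : Int => max m p) := by
    funext m p; exact pv_if_max m p
  rw [hfun]; rfl

-- B's second pass from a 'hit' state is a running max over the eligible elements
lemma pv_fold_true (mx budget : Int) : ∀ (l : List Int) (m : Int),
    l.foldl (pvStep mx budget) (true, m) =
      (true, (l.filter (fun p => decide (p < mx ∧ p ≤ budget))).foldl max m) := by
  intro l
  induction l with
  | nil => intro m; rfl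
  | cons p t ih =>
    intro m
    simp only [List.foldl_cons, List.filter_cons]
    by_cases hp : p < mx ∧ p ≤ budget
    · by_cases hmp : m < p
      · rw [show pvStep mx budget (true, m) p = (true, p) from
          if_pos ⟨hp.1, hp.2, Or.inr hmp⟩]
        rw [ih p]
        simp only [hp.1, hp.2, decide_true, and_self, if_true, List.foldl_cons]
        rw [max_eq_right (le_of_lt hmp)]
      · rw [show pvStep mx budget (true, m) p = (true, m) from by
          simp only [pvStep]
          rw [if_neg]
          rintro ⟨-, -, h | h⟩
          · exact absurd h (by simp)
          · exact hmp h]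
        rw [ih m]
        simp only [hp.1, hp.2, decide_true, and_self, if_true, List.foldl_cons]
        rw [max_eq_left (not_lt.mp hmp)]
    · rw [show pvStep mx budget (true, m) p = (true, m) from by
        simp only [pvStep]
        rw [if_neg]
        rintro ⟨h1, h2, -⟩
        exact hp ⟨h1, h2⟩]
      rw [ih m]
      have : (decide (p < mx ∧ p ≤ budget)) = false := by
        simp only [decide_eq_false_iff_not]; exact hp
      rw [this]
      simp

-- B's second pass from the start: 0 if no element is eligible, else the max of the eligible ones
lemma pv_fold_false (mx budget : Int) : ∀ (l : List Int),
    l.foldl (pvStep mx budget) (false, 0) =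
      (match l.filter (fun p => decide (p < mx ∧ p ≤ budget)) with
       | [] => ((false : Bool), (0 : Int))
       | c :: cs => (true, cs.foldl max c)) := by
  intro l
  induction l with
  | nil => rfl
  | cons p t ih =>
    simp only [List.foldl_cons, List.filter_cons]
    by_cases hp : p < mx ∧ p ≤ budget
    · rw [show pvStep mx budget (false, 0) p = (true, p) from
        if_pos ⟨hp.1, hp.2, Or.inl rfl⟩]
      rw [pv_fold_true mx budget t p]
      simp only [hp.1, hp.2, decide_true, and_self, if_true]
    · rw [show pvStep mx budget (false, 0) p = (false, 0) from by
        simp only [pvStep]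
        rw [if_neg]
        rintro ⟨h1, h2, -⟩
        exact hp ⟨h1, h2⟩]
      rw [ih]
      have : (decide (p < mx ∧ p ≤ budget)) = false := by
        simp only [decide_eq_false_iff_not]; exact hp
      rw [this]
      simp

lemma pv_maxD_match (l : List Int) :
    PySem.List.maxD l (fun x => x) 0 =
      (match l with | [] => (0 : Int) | x :: t => t.foldl max x) := by
  rcases l with _ | ⟨x, t⟩
  · rfl
  · rw [PySem.List.maxD, PySem.List.max?_id_cons, Option.getD_some]

-- pvD is nonempty when laptops is
lemma pv_d_ne (laptops : List Int) (h : laptops ≠ []) : pvD laptops ≠ [] := by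
  rcases laptops with _ | ⟨a, t⟩
  · exact absurd rfl h
  · intro hd
    have ha : a ∈ pvD (a :: t) := (pv_mem_d _ _).mpr (by simp)
    rw [hd] at ha
    cases ha

lemma pv_max_d (laptops : List Int) (h : laptops ≠ []) :
    pvListMax (pvD laptops) = pvListMax laptops :=
  pv_listMax_eq_of_members _ _ (pv_d_ne laptops h) h (pv_mem_d laptops)

-- membership in the tail of pvD: exactly the input elements strictly below the maximum
lemma pv_mem_drop1 (laptops : List Int) (h : laptops ≠ []) (x : Int) :
    x ∈ (pvD laptops).drop 1 ↔ x ∈ laptops ∧ x < pvListMax laptops := by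
  obtain ⟨hd, td, hcons⟩ := List.exists_cons_of_ne_nil (pv_d_ne laptops h)
  have hpw := pv_d_pairwise laptops
  rw [hcons] at hpw
  rcases List.pairwise_cons.mp hpw with ⟨hhd, -⟩
  have hmax : pvListMax laptops = hd := by
    rw [← pv_max_d laptops h, hcons]
    simp only [pvListMax]
    exact pv_foldl_max_le _ hd (fun y hy => le_of_lt (hhd y hy))
  rw [hcons]
  simp only [List.drop_one, List.tail_cons]
  constructor
  · intro hx
    refine ⟨(pv_mem_d laptops x).mp (by rw [hcons]; exact List.mem_cons_of_mem _ hx), ?_⟩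
    rw [hmax]
    exact hhd x hx
  · rintro ⟨hx, hlt⟩
    have : x ∈ hd :: td := by rw [← hcons]; exact (pv_mem_d laptops x).mpr hx
    rcases List.mem_cons.mp this with rfl | hxt
    · rw [hmax] at hlt; exact absurd hlt (lt_irrefl _)
    · exact hxt

-- B equals 'first affordable element of the descending distinct tail'
lemma pv_B_eq (laptops : List Int) (budget : Int) :
    get_laptop_cost_alt laptops budget = pvFirstLe budget ((pvD laptops).drop 1) := by
  rcases laptops with _ | ⟨p0, rest⟩
  · rfl
  · have hne : (p0 :: rest) ≠ [] := by simp
    simp only [get_laptop_cost_alt]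
    rw [pv_mxfold p0 rest]
    rw [pv_fold_false (pvListMax (p0 :: rest)) budget (p0 :: rest)]
    -- the two candidate lists have the same members
    set mx := pvListMax (p0 :: rest) with hmx
    set F := (p0 :: rest).filter (fun p => decide (p < mx ∧ p ≤ budget)) with hF
    set G := ((pvD (p0 :: rest)).drop 1).filter (fun p => decide (p ≤ budget)) with hG
    have hmem : ∀ x, x ∈ F ↔ x ∈ G := by
      intro x
      rw [hF, hG, List.mem_filter, List.mem_filter, pv_mem_drop1 _ hne x]
      simp only [decide_eq_true_eq]
      tauto
    have hGfl : PySem.List.maxD G (fun x => x) 0 = pvFirstLe budget ((pvD (p0 :: rest)).drop 1) := by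
      rw [hG]
      exact pv_firstLe_maxD budget _
        ((List.Pairwise.sublist (List.drop_sublist 1 _) (pv_d_pairwise (p0 :: rest))).imp
          (fun h => le_of_lt h))
    rw [← hGfl, pv_maxD_match]
    rcases hFc : F with _ | ⟨c, cs⟩
    · have : G = [] := by
        rw [List.eq_nil_iff_forall_not_mem]
        intro x hx
        have := (hmem x).mpr hx
        rw [hFc] at this
        cases this
      rw [this]
      rfl
    · have hGne : G ≠ [] := by
        intro hGnil
        have : c ∈ G := (hmem c).mp (by rw [hFc]; simp)
        rw [hGnil] at this
        cases this
      obtain ⟨g, gs, hGc⟩ := List.exists_cons_of_ne_nil hGne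
      rw [hGc]
      simp only
      have : pvListMax (c :: cs) = pvListMax (g :: gs) := by
        refine pv_listMax_eq_of_members _ _ (by simp) (by simp) ?_
        intro x
        rw [← hFc, ← hGc]
        exact hmem x
      simpa only [pvListMax] using this

lemma pv_len_d (laptops : List Int) :
    (PySem.List.dedup laptops).length = (pvD laptops).length := by
  exact ((List.perm_ext_iff_of_nodup (PySem.List.nodup_dedup _) (PySem.List.nodup_dedup _)).mpr
    (fun a => (PySem.List.mem_dedup _ _).trans (pv_mem_d _ a).symm)).length_eq

lemma pv_min_d (laptops : List Int) (h : laptops ≠ []) :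
    pvListMin (pvD laptops) = pvListMin laptops := by
  obtain ⟨hm1, hm2⟩ := pv_listMin_spec _ (pv_d_ne laptops h)
  obtain ⟨hn1, hn2⟩ := pv_listMin_spec laptops h
  exact le_antisymm (hm2 _ ((pv_mem_d _ _).mpr hn1)) (hn2 _ ((pv_mem_d _ _).mp hm1))

lemma pv_getLast_le : ∀ (d : List Int), d.Pairwise (fun a b => b ≤ a) →
    ∀ (h : d ≠ []) (y : Int), y ∈ d → d.getLast h ≤ y := by
  intro d
  induction d with
  | nil => intro _ h; exact absurd rfl h
  | cons x t ih =>
    intro hp h y hy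
    rcases List.pairwise_cons.mp hp with ⟨hx, ht⟩
    rcases t with _ | ⟨z, t'⟩
    · simp only [List.mem_singleton] at hy
      subst hy
      simp
    · rw [List.getLast_cons (by simp)]
      rcases List.mem_cons.mp hy with rfl | hyt
      · exact hx _ (List.getLast_mem _)
      · exact ih ht (by simp) y hyt

lemma pv_listMin_eq_getLast (d : List Int) (hp : d.Pairwise (fun a b => b < a)) (h : d ≠ []) :
    pvListMin d = d.getLast h := by
  obtain ⟨h1, h2⟩ := pv_listMin_spec d h
  exact le_antisymm (h2 _ (List.getLast_mem h)) (pv_getLast_le d (hp.imp (fun hab => le_of_lt hab)) h _ h1)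

-- D_ restated on the deduplicated descending list
lemma pv_D_iff (laptops : List Int) (budget : Int) :
    D_get_laptop_cost laptops budget ↔
      (3 ≤ (pvD laptops).length ∧ pvListMin (pvD laptops) ≤ budget ∧ pvListMin (pvD laptops) ≠ 0 ∧
        ∀ x ∈ pvD laptops, x ≠ pvListMax (pvD laptops) → x ≠ pvListMin (pvD laptops) → budget < x) := by
  unfold D_get_laptop_cost
  by_cases h : laptops = []
  · subst h
    constructor
    · rintro ⟨h3, -⟩
      exact absurd h3 (by decide)
    · rintro ⟨h3, -⟩
      exact absurd h3 (by decide)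
  · rw [pv_len_d]
    obtain ⟨hmin_mem, hmin_lb⟩ := pv_listMin_spec laptops h
    constructor
    · rintro ⟨h3, ⟨m, hm, hmb, hm0⟩, hall⟩
      have hmeq : m = pvListMin laptops :=
        le_antisymm (hall m hm hmb _ hmin_mem) (hmin_lb m hm)
      refine ⟨h3, ?_, ?_, ?_⟩
      · rw [pv_min_d _ h, ← hmeq]; exact hmb
      · rw [pv_min_d _ h, ← hmeq]; exact hm0
      · intro x hx hxmax hxmin
        by_contra hxb
        push Not at hxb
        have hxl : x ∈ laptops := (pv_mem_d _ _).mp hx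
        have hlb := hall x hxl hxb
        exact hxmin (by
          rw [pv_min_d _ h]
          exact le_antisymm (hlb _ hmin_mem) (hmin_lb x hxl))
    · rintro ⟨h3, hminb, hmin0, hmid⟩
      rw [pv_min_d _ h] at hminb hmin0
      refine ⟨h3, ⟨pvListMin laptops, hmin_mem, hminb, hmin0⟩, ?_⟩
      intro x hx hxb y hy
      by_contra hxy
      push Not at hxy
      have hxd : x ∈ pvD laptops := (pv_mem_d _ _).mpr hx
      have hxnotmin : x ≠ pvListMin (pvD laptops) := by
        rw [pv_min_d _ h]
        intro he
        have := hmin_lb y hy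
        omega
      by_cases hxmax : x = pvListMax (pvD laptops)
      · -- x is the maximum; the second distinct price is a 'middle', hence > budget, contradicting x ≤ budget
        obtain ⟨a, t0, hcons0⟩ := List.exists_cons_of_ne_nil (pv_d_ne laptops h)
        have hpw := pv_d_pairwise laptops
        have h3' : 3 ≤ (pvD laptops).length := h3
        rcases t0 with _ | ⟨b, t⟩
        · rw [hcons0] at h3'; simp at h3'
        rcases t with _ | ⟨c, t'⟩
        · rw [hcons0] at h3'; simp at h3'
        rw [hcons0] at hpw hxmax
        rcases List.pairwise_cons.mp hpw with ⟨ha, hst1⟩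
        rcases List.pairwise_cons.mp hst1 with ⟨hblt, hst2⟩
        have hmaxa : pvListMax (a :: b :: c :: t') = a := by
          simp only [pvListMax]
          exact pv_foldl_max_le _ a (fun z hz => le_of_lt (ha z hz))
        have hminlast : pvListMin (a :: b :: c :: t') =
            (a :: b :: c :: t').getLast (by simp) :=
          pv_listMin_eq_getLast _ hpw (by simp)
        have hbmid : budget < b := by
          refine hmid b (by rw [hcons0]; simp) ?_ ?_
          · rw [hcons0, hmaxa]
            exact ne_of_lt (ha b (by simp))
          · rw [hcons0, hminlast]
            have hlast_mem : (a :: b :: c :: t').getLast (by simp) ∈ c :: t' := by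
              rw [List.getLast_cons (by simp), List.getLast_cons (by simp)]
              exact List.getLast_mem _
            exact (hblt _ hlast_mem).ne'
        rw [hmaxa] at hxmax
        subst hxmax
        have := ha b (by simp)
        omega
      · exact absurd hxb (not_le.mpr (hmid x hxd hxmax hxnotmin))

lemma pv_core (budget : Int) (d : List Int) (hstrict : d.Pairwise (fun a b => b < a))
    (hnD : ¬ (3 ≤ d.length ∧ pvListMin d ≤ budget ∧ pvListMin d ≠ 0 ∧
      ∀ x ∈ d, x ≠ pvListMax d → x ≠ pvListMin d → budget < x)) :
    (if 2 ≤ d.length ∧ PySem.List.pyGetD d 1 0 ≤ budget then PySem.List.pyGetD d 1 0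
     else pvFirstLe budget ((d.drop 2).take (d.length - 1 - 2))) = pvFirstLe budget (d.drop 1) := by
  rcases d with _ | ⟨a, _ | ⟨b, t⟩⟩
  · norm_num [pvFirstLe]
  · norm_num [pvFirstLe]
  · have hb1 : PySem.List.pyGetD (a :: b :: t) 1 0 = b := by
      rw [PySem.List.pyGetD_ofNat']
      rfl
    have hdrop1 : (a :: b :: t).drop 1 = b :: t := rfl
    by_cases hb : b ≤ budget
    · rw [if_pos ⟨by simp only [List.length_cons]; omega, by rw [hb1]; exact hb⟩, hb1, hdrop1]
      simp [pvFirstLe, hb]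
    · rw [if_neg (fun hc => hb (hb1 ▸ hc.2)), hdrop1]
      have hlen : (a :: b :: t).length - 1 - 2 = t.length - 1 := by
        simp only [List.length_cons]; omega
      have hdrop2 : (a :: b :: t).drop 2 = t := rfl
      rw [hdrop2, hlen]
      simp only [pvFirstLe, if_neg hb]
      rcases t with _ | ⟨c, t'⟩
      · rfl
      · rw [show (c :: t').length - 1 = (c :: t').length - 1 from rfl, ← List.dropLast_eq_take]
        have hmne : (c :: t') ≠ [] := by simp
        have hdec : (c :: t').dropLast ++ [(c :: t').getLast hmne] = c :: t' :=
          List.dropLast_append_getLast hmne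
        by_cases hex : ∃ y ∈ (c :: t').dropLast, y ≤ budget
        · conv_rhs => rw [← hdec]
          rw [pv_firstLe_append_hit budget _ _ hex]
        · push Not at hex
          rw [pv_firstLe_zero budget _ hex]
          conv_rhs => rw [← hdec]
          rw [pv_firstLe_append_none budget _ _ hex]
          set m := (c :: t').getLast hmne with hmdef
          by_cases hmb : m ≤ budget
          · by_cases hm0 : m = 0
            · simp [pvFirstLe, hm0]
            · exfalso
              apply hnD
              have hne : (a :: b :: c :: t') ≠ [] := by simp
              have hmin : pvListMin (a :: b :: c :: t') = m := by
                rw [pv_listMin_eq_getLast _ hstrict hne, hmdef]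
                simp [List.getLast_cons]
              have hmax : pvListMax (a :: b :: c :: t') = a := by
                simp only [pvListMax]
                exact pv_foldl_max_le _ a
                  (fun y hy => le_of_lt ((List.pairwise_cons.mp hstrict).1 y hy))
              refine ⟨by simp only [List.length_cons]; omega,
                by rw [hmin]; exact hmb, by rw [hmin]; exact hm0, ?_⟩
              intro x hx hxa hxm
              rw [hmax] at hxa
              rw [hmin] at hxm
              rcases List.mem_cons.mp hx with rfl | hx1
              · exact absurd rfl hxa
              rcases List.mem_cons.mp hx1 with rfl | hx2
              · exact not_le.mp hb
              rw [← hdec] at hx2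
              rcases List.mem_append.mp hx2 with hxl | hxr
              · exact hex x hxl
              · simp only [List.mem_singleton] at hxr
                exact absurd hxr hxm
          · simp [pvFirstLe, hmb]

lemma pv_core_diff (budget : Int) (d : List Int) (hstrict : d.Pairwise (fun a b => b < a))
    (hD : 3 ≤ d.length ∧ pvListMin d ≤ budget ∧ pvListMin d ≠ 0 ∧
      ∀ x ∈ d, x ≠ pvListMax d → x ≠ pvListMin d → budget < x) :
    (if 2 ≤ d.length ∧ PySem.List.pyGetD d 1 0 ≤ budget then PySem.List.pyGetD d 1 0
     else pvFirstLe budget ((d.drop 2).take (d.length - 1 - 2))) = 0 ∧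
    pvFirstLe budget (d.drop 1) = pvListMin d := by
  obtain ⟨h3, hmle, hm0, hmid⟩ := hD
  rcases d with _ | ⟨a, _ | ⟨b, _ | ⟨c, t'⟩⟩⟩
  · simp at h3
  · simp at h3
  · simp at h3
  · have hb1 : PySem.List.pyGetD (a :: b :: c :: t') 1 0 = b := by
      rw [PySem.List.pyGetD_ofNat']
      rfl
    have hne : (a :: b :: c :: t') ≠ [] := by simp
    have hmne : (c :: t') ≠ [] := by simp
    set m := (c :: t').getLast hmne with hmdef
    have hmin : pvListMin (a :: b :: c :: t') = m := by
      rw [pv_listMin_eq_getLast _ hstrict hne, hmdef]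
      simp [List.getLast_cons]
    have hmax : pvListMax (a :: b :: c :: t') = a := by
      simp only [pvListMax]
      exact pv_foldl_max_le _ a
        (fun y hy => le_of_lt ((List.pairwise_cons.mp hstrict).1 y hy))
    rcases List.pairwise_cons.mp hstrict with ⟨ha, hst1⟩
    rcases List.pairwise_cons.mp hst1 with ⟨hblt, hst2⟩
    have hdec : (c :: t').dropLast ++ [m] = c :: t' := by
      rw [hmdef]
      exact List.dropLast_append_getLast hmne
    have hml : ∀ y ∈ (c :: t').dropLast, m < y := by
      have hp2 : ((c :: t').dropLast ++ [m]).Pairwise (fun a b => b < a) := by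
        rw [hdec]
        exact hst2
      intro y hy
      exact (List.pairwise_append.mp hp2).2.2 y hy m (by simp)
    have hbb : budget < b := by
      refine hmid b (by simp) ?_ ?_
      · rw [hmax]
        exact ne_of_lt (ha b (by simp))
      · rw [hmin]
        exact (hblt m (by rw [hmdef]; exact List.getLast_mem hmne)).ne'
    have hmidl : ∀ y ∈ (c :: t').dropLast, budget < y := by
      intro y hy
      have hyd : y ∈ (c :: t') := by
        rw [← hdec]
        exact List.mem_append.mpr (Or.inl hy)
      refine hmid y (by simp [hyd]) ?_ ?_
      · rw [hmax]
        exact ne_of_lt (ha y (by simp [hyd]))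
      · rw [hmin]
        exact (hml y hy).ne'
    constructor
    · rw [if_neg (fun hc => absurd hc.2 (by rw [hb1]; exact not_le.mpr hbb))]
      have hlen : (a :: b :: c :: t').length - 1 - 2 = (c :: t').length - 1 := by
        simp only [List.length_cons]; omega
      rw [show (a :: b :: c :: t').drop 2 = c :: t' from rfl, hlen, ← List.dropLast_eq_take]
      exact pv_firstLe_zero budget _ hmidl
    · have hmleb : m ≤ budget := hmin ▸ hmle
      rw [show (a :: b :: c :: t').drop 1 = b :: c :: t' from rfl, hmin]
      show (if b ≤ budget then b else pvFirstLe budget (c :: t')) = m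
      rw [if_neg (not_le.mpr hbb)]
      conv_lhs => rw [← hdec]
      rw [pv_firstLe_append_none budget _ _ hmidl]
      simp [pvFirstLe, hmleb]

-- ===== VERDICT (by name: the statement is the Claim_ definition above) =====
theorem get_laptop_cost_spec : Claim_unchanged_get_laptop_cost := by
  intro laptops budget _ hnD
  rw [pv_A_eq, pv_B_eq]
  exact pv_core budget (pvD laptops) (pv_d_pairwise laptops) (by rwa [pv_D_iff] at hnD)

theorem get_laptop_cost_changed : Claim_changed_get_laptop_cost := by
  unfold Claim_changed_get_laptop_cost; decide

theorem get_laptop_cost_tight : Claim_exact_get_laptop_cost := by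
  intro laptops budget _ hD
  rw [pv_A_eq, pv_B_eq]
  have h := pv_core_diff budget (pvD laptops) (pv_d_pairwise laptops) ((pv_D_iff laptops budget).mp hD)
  rw [h.1, h.2]
  exact fun he => ((pv_D_iff laptops budget).mp hD).2.2.1 he.symm
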